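-- pv_equiv track=rewrite | github.com/google-deepmind/lamb | lamb/utils.py | gradients_for_var_group
-- ===== SOURCE A (Python) =====
-- def gradients_for_var_group(var_groups, gradients, name):
--   """Returns a slice of `gradients` belonging to the var group `name`."""
--   start = 0
--   for group_name in sorted(var_groups.keys()):
--     n = len(var_groups[group_name])
--     if group_name == name:
--       return gradients[start:start+n]
--     start += n
--   return []
-- ===== SOURCE B (Python) =====
-- def gradients_for_var_group(var_groups, gradients, name):
--   """Returns a slice of `gradients` belonging to the var group `name`."""
--   slices = {}
--   rest = gradients
--   for g in sorted(var_groups):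
--     n = len(var_groups[g])
--     slices[g], rest = rest[:n], rest[n:]
--   return slices.get(name, [])
-- ===== Notes on version B (the rewrite author's own statement) =====
-- stated objective: alternative
-- what changed: Instead of accumulating an integer offset and slicing by index with an early return, B partitions `gradients` itself: it peels each sorted group's prefix off the remaining list, records every group's slice in a dict, and finally looks up `name` with a default - no offset arithmetic and no early termination, at the cost of copying the remainder once per group.
import Mathlib
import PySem

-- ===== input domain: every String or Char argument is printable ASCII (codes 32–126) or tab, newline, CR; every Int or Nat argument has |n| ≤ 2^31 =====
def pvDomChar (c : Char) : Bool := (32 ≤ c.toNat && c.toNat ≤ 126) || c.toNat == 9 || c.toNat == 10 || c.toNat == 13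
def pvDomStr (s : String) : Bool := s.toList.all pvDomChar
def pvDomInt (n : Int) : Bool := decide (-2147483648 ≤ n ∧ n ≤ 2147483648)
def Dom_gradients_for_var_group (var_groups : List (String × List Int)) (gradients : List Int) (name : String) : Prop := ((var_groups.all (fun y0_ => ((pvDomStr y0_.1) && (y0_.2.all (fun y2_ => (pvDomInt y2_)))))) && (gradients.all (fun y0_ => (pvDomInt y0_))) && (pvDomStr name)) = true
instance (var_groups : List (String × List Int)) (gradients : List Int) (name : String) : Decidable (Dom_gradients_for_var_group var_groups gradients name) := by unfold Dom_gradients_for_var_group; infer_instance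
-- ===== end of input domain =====

-- B replaces A's offset-accumulating early-return scan by partitioning `gradients` itself:
-- it peels each sorted group's prefix off the remaining list into a dict of slices, then
-- looks up `name` with default [] (alternative decomposition: no index arithmetic, no early return).

-- ===== PORT A =====
-- A's loop: for group_name in sorted(var_groups.keys()): accumulate `start`, return the slice at `name`.
def pvLoopA (d : PySem.Dict String (List Int)) (gradients : List Int) (name : String) :
    List String → Int → List Int
  | [], _ => []
  | k :: ks, start =>
      let n := PySem.List.len (d.getD k [])
      if k = name then PySem.List.slice gradients (some start) (some (start + n))
      else pvLoopA d gradients name ks (start + n)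

def gradients_for_var_group (var_groups : List (String × List Int)) (gradients : List Int) (name : String) : List Int :=
  let d := PySem.Dict.ofList var_groups
  pvLoopA d gradients name (PySem.List.sorted d.keys (fun x => x) false) 0

-- ===== PORT B =====
-- B's loop: for g in sorted(var_groups): slices[g], rest = rest[:n], rest[n:]
def pvPeelB (d : PySem.Dict String (List Int)) :
    List String → List Int → PySem.Dict String (List Int) → PySem.Dict String (List Int)
  | [], _, sl => sl
  | g :: ks, rest, sl =>
      let n := PySem.List.len (d.getD g [])
      pvPeelB d ks (PySem.List.slice rest (some n) none)
        (sl.insert g (PySem.List.slice rest none (some n)))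

def gradients_for_var_group_alt (var_groups : List (String × List Int)) (gradients : List Int) (name : String) : List Int :=
  let d := PySem.Dict.ofList var_groups
  (pvPeelB d (PySem.List.sorted d.keys (fun x => x) false) gradients PySem.Dict.empty).getD name []

-- ===== PRECONDITION & SPEC =====
def Spec_gradients_for_var_group (var_groups : List (String × List Int)) (gradients : List Int) (name : String) (out : List Int) : Prop := out = gradients_for_var_group_alt var_groups gradients name
instance (var_groups : List (String × List Int)) (gradients : List Int) (name : String) (out : List Int) : Decidable (Spec_gradients_for_var_group var_groups gradients name out) := by unfold Spec_gradients_for_var_group; infer_instance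

-- ===== CLAIM (what is proved, stated in full; the proofs are below) =====
def Claim_equal_gradients_for_var_group : Prop := ∀ (var_groups : List (String × List Int)) (gradients : List Int) (name : String), Dom_gradients_for_var_group var_groups gradients name → Spec_gradients_for_var_group var_groups gradients name (gradients_for_var_group var_groups gradients name)

-- ===== LEMMAS AND PROOFS =====

-- A's loop at a nonnegative offset is A's loop on the dropped list at offset 0.
theorem pvLoopA_shift (d : PySem.Dict String (List Int)) (name : String) :
    ∀ (ks : List String) (grads : List Int) (start : Int), 0 ≤ start →
      pvLoopA d grads name ks start = pvLoopA d (grads.drop start.toNat) name ks 0 := by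
  intro ks
  induction ks with
  | nil => intro grads start _; simp [pvLoopA]
  | cons k ks ih =>
      intro grads start hs
      by_cases hk : k = name
      · subst hk
        have hn : (0 : Int) ≤ PySem.List.len (d.getD k []) := by
          simp [PySem.List.len_eq]
        simp only [pvLoopA]
        rw [if_pos trivial, if_pos trivial,
            PySem.List.slice_toNat grads hs (by omega),
            PySem.List.slice_toNat (grads.drop start.toNat) le_rfl (by omega)]
        rw [List.drop_drop, Int.toNat_zero, Nat.add_zero]
        congr 1
        omega
      · have hn : (0 : Int) ≤ PySem.List.len (d.getD k []) := by
          simp [PySem.List.len_eq]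
        simp only [pvLoopA]
        rw [if_neg hk, if_neg hk,
            ih grads (start + PySem.List.len (d.getD k [])) (by omega),
            ih (grads.drop start.toNat) (0 + PySem.List.len (d.getD k [])) (by omega),
            List.drop_drop]
        have he : (start + PySem.List.len (d.getD k [])).toNat
            = start.toNat + (0 + PySem.List.len (d.getD k [])).toNat := by omega
        rw [he]

-- If `name` never occurs among the remaining keys, A's loop returns [].
theorem pvLoopA_not_mem (d : PySem.Dict String (List Int)) (grads : List Int) (name : String) :
    ∀ (ks : List String) (start : Int), name ∉ ks → pvLoopA d grads name ks start = [] := by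
  intro ks
  induction ks with
  | nil => intro start _; simp [pvLoopA]
  | cons k ks ih =>
      intro start h
      have hk : ¬ k = name := fun he => h (he ▸ List.mem_cons_self)
      simp only [pvLoopA, if_neg hk]
      exact ih _ (fun hm => h (List.mem_cons_of_mem _ hm))

-- B's peel over keys not containing `name` leaves the lookup at `name` unchanged.
theorem pvPeelB_getD_not_mem (d : PySem.Dict String (List Int)) (name : String) :
    ∀ (ks : List String) (grads : List Int) (sl : PySem.Dict String (List Int)),
      name ∉ ks → (pvPeelB d ks grads sl).getD name [] = sl.getD name [] := by
  intro ks
  induction ks with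
  | nil => intro grads sl _; simp [pvPeelB]
  | cons k ks ih =>
      intro grads sl h
      have hk : name ≠ k := fun he => h (he ▸ List.mem_cons_self)
      simp only [pvPeelB]
      rw [ih _ _ (fun hm => h (List.mem_cons_of_mem _ hm)),
          PySem.Dict.getD_insert_of_ne _ _ _ hk]

-- The lookup after B's peel is exactly A's loop (from offset 0) when the key occurs.
theorem pvPeelB_getD (d : PySem.Dict String (List Int)) (name : String) :
    ∀ (ks : List String) (grads : List Int) (sl : PySem.Dict String (List Int)), ks.Nodup →
      (pvPeelB d ks grads sl).getD name [] =
        if name ∈ ks then pvLoopA d grads name ks 0 else sl.getD name [] := by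
  intro ks
  induction ks with
  | nil => intro grads sl _; simp [pvPeelB]
  | cons k ks ih =>
      intro grads sl hnd
      rcases List.nodup_cons.mp hnd with ⟨hknotin, hnd'⟩
      have hn : (0 : Int) ≤ PySem.List.len (d.getD k []) := by
        simp [PySem.List.len_eq]
      by_cases hk : k = name
      · subst hk
        rw [pvPeelB, pvPeelB_getD_not_mem d k ks _ _ hknotin,
            PySem.Dict.getD_insert_self]
        simp only [List.mem_cons_self, if_true, pvLoopA, zero_add]
        rw [PySem.List.slice_toNat grads le_rfl hn, Int.toNat_zero, List.drop_zero,
            PySem.List.slice_to grads hn]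
        simp
      · rw [pvPeelB, ih _ _ hnd']
        by_cases hm : name ∈ ks
        · have : name ∈ k :: ks := List.mem_cons_of_mem _ hm
          simp only [hm, if_true, this, if_true]
          simp only [pvLoopA, if_neg hk, zero_add]
          rw [pvLoopA_shift d name ks grads (PySem.List.len (d.getD k [])) hn,
              PySem.List.slice_from grads hn]
        · have hnm : name ∉ k :: ks := by
            intro hc
            rcases List.mem_cons.mp hc with h | h
            · exact hk h.symm
            · exact hm h
          simp only [hm, if_false, hnm, if_false]
          exact PySem.Dict.getD_insert_of_ne _ _ _ (fun he => hk he.symm)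

-- ===== VERDICT (by name: the statement is the Claim_ definition above) =====
theorem gradients_for_var_group_spec : Claim_equal_gradients_for_var_group := by
  intro var_groups gradients name _
  unfold Spec_gradients_for_var_group gradients_for_var_group gradients_for_var_group_alt
  have hnd : (PySem.List.sorted (PySem.Dict.ofList var_groups).keys (fun x => x) false).Nodup :=
    (PySem.List.sorted_perm (PySem.Dict.ofList var_groups).keys (fun x => x) false).nodup_iff.mpr
      (PySem.Dict.nodup_keys_ofList var_groups)
  rw [pvPeelB_getD (PySem.Dict.ofList var_groups) name _ gradients PySem.Dict.empty hnd]
  by_cases hm : name ∈ PySem.List.sorted (PySem.Dict.ofList var_groups).keys (fun x => x) false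
  · simp [hm]
  · simp [hm, pvLoopA_not_mem (PySem.Dict.ofList var_groups) gradients name _ 0 hm,
      PySem.Dict.getD_empty]
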